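-- pv_equiv track=rewrite | github.com/nicholasjbeaver/HEA_prediction | gcp_utils/utils.py | last_line
-- ===== SOURCE A (Python) =====
-- def last_line(value, default=None):
--     """Return the last line of a string"""
--     lines = value.splitlines()
--     i = len(lines) - 1
--     while i >= 0:
--         line = lines[i].strip()
--         if line:
--             return line
--         i -= 1
--     return default
-- ===== SOURCE B (Python) =====
-- def last_line(value, default=None):
--     result = default
--     for line in value.splitlines():
--         s = line.strip()
--         if s:
--             result = s
--     return result
-- ===== Notes on version B (the rewrite author's own statement) =====
-- stated objective: simpler
-- what changed: Replaced the backward index scan with early return by a single forward pass that overwrites an accumulator with each non-blank stripped line and returns it after the loop.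
import Mathlib
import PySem

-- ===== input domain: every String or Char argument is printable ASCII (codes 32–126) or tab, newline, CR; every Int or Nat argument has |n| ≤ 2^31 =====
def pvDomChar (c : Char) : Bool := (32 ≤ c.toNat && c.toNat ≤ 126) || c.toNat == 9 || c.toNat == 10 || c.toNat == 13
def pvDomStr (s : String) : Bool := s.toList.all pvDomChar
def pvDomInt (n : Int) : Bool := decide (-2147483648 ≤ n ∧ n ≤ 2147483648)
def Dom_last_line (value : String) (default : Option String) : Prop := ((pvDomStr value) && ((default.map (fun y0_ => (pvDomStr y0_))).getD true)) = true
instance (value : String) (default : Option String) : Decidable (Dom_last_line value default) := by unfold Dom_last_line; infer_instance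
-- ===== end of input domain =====

-- B replaces A's backward index scan with early return by a single forward pass
-- accumulating the last non-blank stripped line (objective: simpler decomposition).

-- ===== PORT A =====
-- A's while loop: i counts down from len-1; here the Nat argument is i+1 (0 = loop ended).
def lastLineLoop (lines : List String) (default : Option String) : Nat → Option String
  | 0 => default
  | n + 1 =>
    let line := PySem.Str.strip (lines.getD n "")   -- index n is always in range here
    if line ≠ "" then some line else lastLineLoop lines default n

def last_line (value : String) (default : Option String) : Option String :=
  let lines := PySem.Str.splitlines value
  lastLineLoop lines default lines.length

-- ===== PORT B =====
def last_line_alt (value : String) (default : Option String) : Option String :=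
  (PySem.Str.splitlines value).foldl
    (fun result line =>
      let s := PySem.Str.strip line
      if s ≠ "" then some s else result)
    default

-- ===== PRECONDITION & SPEC =====
def Spec_last_line (value : String) (default : Option String) (out : Option String) : Prop := out = last_line_alt value default
instance (value : String) (default : Option String) (out : Option String) : Decidable (Spec_last_line value default out) := by unfold Spec_last_line; infer_instance

-- ===== CLAIM (what is proved, stated in full; the proofs are below) =====
def Claim_equal_last_line : Prop := ∀ (value : String) (default : Option String), Dom_last_line value default → Spec_last_line value default (last_line value default)

-- ===== LEMMAS AND PROOFS =====
theorem lastLineLoop_append (xs : List String) (x : String) (d : Option String) :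
    ∀ n, n ≤ xs.length → lastLineLoop (xs ++ [x]) d n = lastLineLoop xs d n := by
  intro n
  induction n with
  | zero => intro _; rfl
  | succ k ih =>
    intro h
    simp only [lastLineLoop, List.getD_append _ _ _ _ (by omega : k < xs.length)]
    rw [ih (by omega)]

theorem lastLineLoop_eq_foldl (xs : List String) (d : Option String) :
    lastLineLoop xs d xs.length =
      xs.foldl (fun result line =>
        let s := PySem.Str.strip line
        if s ≠ "" then some s else result) d := by
  induction xs using List.reverseRecOn with
  | nil => rfl
  | append_singleton xs x ih =>
    simp only [List.length_append, List.length_cons, List.length_nil, List.foldl_append,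
      List.foldl_cons, List.foldl_nil]
    show lastLineLoop (xs ++ [x]) d (xs.length + 1) = _
    simp only [lastLineLoop, List.getD_append_right, le_refl, Nat.sub_self]
    by_cases h : PySem.Str.strip x = ""
    · simp [h, lastLineLoop_append xs x d xs.length (le_refl _), ih, List.getD]
    · simp [h, List.getD]

-- ===== VERDICT (by name: the statement is the Claim_ definition above) =====
theorem last_line_spec : Claim_equal_last_line := by
  intro value default _
  unfold Spec_last_line last_line last_line_alt
  exact lastLineLoop_eq_foldl _ _
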